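-- pv_equiv track=rewrite | github.com/21Hzzzz/GmgnTwitterTgAlert | gmgn_twitter_monitor/summarizer.py | _join_limited
-- ===== SOURCE A (Python) =====
-- def _join_limited(lines: list[str], limit: int) -> str:
--     output: list[str] = []
--     current_len = 0
--     for line in lines:
--         added_len = len(line) + (1 if output else 0)
--         if current_len + added_len > limit - 20:
--             output.append("...")
--             break
--         output.append(line)
--         current_len += added_len
--     return "\n".join(output)
-- ===== SOURCE B (Python) =====
-- def _join_limited(lines: list[str], limit: int) -> str:
--     # Build the cumulative-size table first: cum[i] = chars of lines[:i+1] plus i separators.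
--     cum = []
--     total = 0
--     for i, line in enumerate(lines):
--         total += len(line)
--         cum.append(total + i)
--     # Locate the first line whose cumulative size exceeds the budget.
--     cutoff = next((i for i, c in enumerate(cum) if c > limit - 20), len(lines))
--     if cutoff == len(lines):
--         return "\n".join(lines)
--     return "\n".join(lines[:cutoff] + ["..."])
-- ===== Notes on version B (the rewrite author's own statement) =====
-- stated objective: alternative
-- what changed: Replaces A's single incremental loop with early break by a build-then-locate decomposition: first a cumulative-size table (chars plus separators per prefix), then a scan for the first index exceeding limit-20, then one join of the chosen prefix (plus '...' iff a cutoff exists).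
import Mathlib
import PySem

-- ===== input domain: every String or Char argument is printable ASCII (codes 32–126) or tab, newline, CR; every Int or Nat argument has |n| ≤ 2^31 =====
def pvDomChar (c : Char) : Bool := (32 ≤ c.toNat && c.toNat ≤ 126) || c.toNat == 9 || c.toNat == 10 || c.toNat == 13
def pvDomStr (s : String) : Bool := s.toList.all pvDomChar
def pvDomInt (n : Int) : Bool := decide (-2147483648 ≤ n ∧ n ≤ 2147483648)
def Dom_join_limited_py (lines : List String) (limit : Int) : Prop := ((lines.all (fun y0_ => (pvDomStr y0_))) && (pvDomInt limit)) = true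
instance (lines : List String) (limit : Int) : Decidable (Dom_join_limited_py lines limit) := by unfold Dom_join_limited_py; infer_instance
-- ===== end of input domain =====

-- B replaces A's incremental break-loop with a cumulative-size table plus a single
-- cutoff search (alternative decomposition, same cost).

-- ===== PORT A =====
-- A's for-loop with early break: state = (output, current_len).
def joinAGo (limit : Int) : List String → List String → Int → List String
  | [], output, _ => output
  | line :: rest, output, current_len =>
    let added_len := PySem.Str.len line + (if output.isEmpty then 0 else 1)
    if current_len + added_len > limit - 20 then
      output ++ ["..."]
    else
      joinAGo limit rest (output ++ [line]) (current_len + added_len)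

def join_limited_py (lines : List String) (limit : Int) : String :=
  PySem.Str.join "\n" (joinAGo limit lines [] 0)

-- ===== PORT B =====
-- B's first loop: cum.append(total + i) with total the running sum of lengths.
def cumTable : List String → Int → Int → List Int
  | [], _, _ => []
  | line :: rest, total, i =>
    (total + PySem.Str.len line + i) :: cumTable rest (total + PySem.Str.len line) (i + 1)

def join_limited_py_alt (lines : List String) (limit : Int) : String :=
  let cum := cumTable lines 0 0
  -- next((i for i, c in enumerate(cum) if c > limit - 20), len(lines))
  let cutoff := cum.findIdx (fun c => c > limit - 20)
  if cutoff = lines.length then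
    PySem.Str.join "\n" lines
  else
    PySem.Str.join "\n" (lines.take cutoff ++ ["..."])

-- ===== PRECONDITION & SPEC =====
def Spec_join_limited_py (lines : List String) (limit : Int) (out : String) : Prop := out = join_limited_py_alt lines limit
instance (lines : List String) (limit : Int) (out : String) : Decidable (Spec_join_limited_py lines limit out) := by unfold Spec_join_limited_py; infer_instance

-- ===== CLAIM (what is proved, stated in full; the proofs are below) =====
def Claim_equal_join_limited_py : Prop := ∀ (lines : List String) (limit : Int), Dom_join_limited_py lines limit → Spec_join_limited_py lines limit (join_limited_py lines limit)

-- ===== LEMMAS AND PROOFS =====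

-- The tail A's loop produces once output is nonempty (so each line costs len + 1).
def sfxList (limit : Int) : List String → Int → List String
  | [], _ => []
  | l :: rest, cur =>
    if cur + (PySem.Str.len l + 1) > limit - 20 then ["..."]
    else l :: sfxList limit rest (cur + (PySem.Str.len l + 1))

theorem joinAGo_nonempty (limit : Int) :
    ∀ (lines out : List String) (cur : Int), out ≠ [] →
      joinAGo limit lines out cur = out ++ sfxList limit lines cur := by
  intro lines
  induction lines with
  | nil => intro out cur _; simp [joinAGo, sfxList]
  | cons l rest ih =>
    intro out cur hne
    have hout : (if out.isEmpty = true then (0 : Int) else 1) = 1 := by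
      cases out with
      | nil => exact absurd rfl hne
      | cons a t => rfl
    simp only [joinAGo, sfxList, hout]
    split
    · rfl
    · rw [ih (out ++ [l]) (cur + (PySem.Str.len l + 1)) (by simp)]
      simp

theorem sfx_eq_cut (limit : Int) :
    ∀ (lines : List String) (total i : Int),
      (let cum := cumTable lines total i
       let k := cum.findIdx (fun c => c > limit - 20)
       if k = lines.length then lines else lines.take k ++ ["..."])
      = sfxList limit lines (total + i - 1) := by
  intro lines
  induction lines with
  | nil => intro total i; simp [cumTable, sfxList]
  | cons l rest ih =>
    intro total i
    simp only [cumTable, sfxList, List.findIdx_cons]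
    by_cases hov : total + PySem.Str.len l + i > limit - 20
    · have hcond : (total + i - 1) + (PySem.Str.len l + 1) > limit - 20 := by omega
      simp only [decide_eq_true hov, cond_true, if_pos hcond]
      have : (0 : Nat) ≠ (l :: rest).length := by simp
      rw [if_neg this]
      simp
    · have hcond : ¬ ((total + i - 1) + (PySem.Str.len l + 1) > limit - 20) := by omega
      simp only [decide_eq_false hov, cond_false, if_neg hcond]
      have := ih (total + PySem.Str.len l) (i + 1)
      simp only at this
      have harg : total + PySem.Str.len l + (i + 1) - 1 = total + i - 1 + (PySem.Str.len l + 1) := by ring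
      rw [harg] at this
      rw [← this]
      set k' := (cumTable rest (total + PySem.Str.len l) (i + 1)).findIdx (fun c => c > limit - 20) with hk'
      by_cases hlen : k' = rest.length
      · rw [if_pos (by simp [hlen]), if_pos hlen]
      · rw [if_neg (by simp [hlen]), if_neg hlen]
        simp [List.take_succ_cons]

theorem main_list_eq (lines : List String) (limit : Int) :
    join_limited_py lines limit = join_limited_py_alt lines limit := by
  cases lines with
  | nil => simp [join_limited_py, join_limited_py_alt, joinAGo, cumTable]
  | cons l rest =>
    have hz : (if ([] : List String).isEmpty = true then (0 : Int) else 1) = 0 := rfl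
    simp only [join_limited_py, join_limited_py_alt, joinAGo, cumTable, hz,
      List.findIdx_cons]
    by_cases hov : (0 : Int) + (PySem.Str.len l + 0) > limit - 20
    · have hov' : (0 : Int) + PySem.Str.len l + 0 > limit - 20 := by
        rw [show (0 : Int) + PySem.Str.len l + 0 = 0 + (PySem.Str.len l + 0) from by ring]
        exact hov
      rw [if_pos hov]
      simp only [decide_eq_true hov', cond_true]
      rw [if_neg (show (0 : Nat) ≠ (l :: rest).length by simp)]
      simp
    · have hov' : ¬ ((0 : Int) + PySem.Str.len l + 0 > limit - 20) := by
        intro h; apply hov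
        rw [show (0 : Int) + (PySem.Str.len l + 0) = 0 + PySem.Str.len l + 0 from by ring]
        exact h
      rw [if_neg hov]
      simp only [decide_eq_false hov', cond_false]
      rw [joinAGo_nonempty limit rest ([] ++ [l]) (0 + (PySem.Str.len l + 0)) (by simp)]
      have hB := sfx_eq_cut limit rest (0 + PySem.Str.len l) (0 + 1)
      simp only at hB
      rw [show (0 : Int) + PySem.Str.len l + (0 + 1) - 1 = 0 + (PySem.Str.len l + 0) from by ring] at hB
      rw [← hB]
      set k' := (cumTable rest (0 + PySem.Str.len l) (0 + 1)).findIdx (fun c => c > limit - 20) with hk'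
      by_cases hlen : k' = rest.length
      · rw [if_pos hlen, if_pos (show k' + 1 = (l :: rest).length by simp [hlen])]
        simp
      · rw [if_neg hlen, if_neg (show ¬ k' + 1 = (l :: rest).length by simp [hlen])]
        simp [List.take_succ_cons]

-- ===== VERDICT (by name: the statement is the Claim_ definition above) =====
theorem join_limited_py_spec : Claim_equal_join_limited_py := by
  intro lines limit _
  unfold Spec_join_limited_py
  exact main_list_eq lines limit
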